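-- pv_equiv track=rewrite | github.com/AYkimchi2000/videotopdfv1.0 | videotopdf_script.py | combine_to_tuple_extract_groups
-- ===== SOURCE A (Python) =====
-- def combine_to_tuple_extract_groups(score_list, frame_list):
--     combined_tuple = tuple(zip(score_list, frame_list))
--     groups = []
--     current_group = []
--
--     for i, (key, value) in enumerate(combined_tuple):
--         if current_group and key != current_group[-1][0]:
--             groups.append(current_group)
--             current_group = []
--         current_group.append((key, value))
--
--     if current_group:
--         groups.append(current_group)
--
--     return groups
-- ===== SOURCE B (Python) =====
-- def combine_to_tuple_extract_groups(score_list, frame_list):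
--     combined = list(zip(score_list, frame_list))
--     n = len(combined)
--     # staged: (1) find the boundary indices where a new run of equal scores starts,
--     # (2) slice the combined list between consecutive boundaries
--     bounds = [i for i in range(n) if i == 0 or combined[i][0] != combined[i - 1][0]]
--     bounds.append(n)
--     return [combined[a:b] for a, b in zip(bounds, bounds[1:])]
-- ===== Notes on version B (the rewrite author's own statement) =====
-- stated objective: alternative
-- what changed: Replaces A's single-pass accumulator (current_group flushed on key change) by a staged index-arithmetic algorithm: first compute the list of boundary indices where the score differs from its predecessor, then slice the zipped list between consecutive boundaries.
import Mathlib
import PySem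

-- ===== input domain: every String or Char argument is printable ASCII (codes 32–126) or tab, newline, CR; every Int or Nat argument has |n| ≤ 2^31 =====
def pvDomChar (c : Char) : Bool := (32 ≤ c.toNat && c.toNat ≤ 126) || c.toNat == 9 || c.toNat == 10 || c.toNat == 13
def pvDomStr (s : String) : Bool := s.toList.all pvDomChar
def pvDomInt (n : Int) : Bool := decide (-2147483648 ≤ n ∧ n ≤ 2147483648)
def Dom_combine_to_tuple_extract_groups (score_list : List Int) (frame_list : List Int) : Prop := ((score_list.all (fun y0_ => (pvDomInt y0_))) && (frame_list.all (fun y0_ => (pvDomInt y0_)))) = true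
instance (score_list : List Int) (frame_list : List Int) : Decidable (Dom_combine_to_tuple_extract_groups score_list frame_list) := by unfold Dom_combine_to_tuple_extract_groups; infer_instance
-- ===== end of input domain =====

-- B replaces A's single-pass accumulator by a staged algorithm: compute the boundary
-- indices where the score changes, then slice the zipped list between consecutive
-- boundaries; same O(n) cost, a different decomposition.


-- ===== PORT A =====
-- one step of A's for-loop over (groups, current_group); current_group[-1][0] is the
-- first component of the last element (guarded by current_group ≠ [])
def pvStepA (st : List (List (Int × Int)) × List (Int × Int)) (kv : Int × Int) :
    List (List (Int × Int)) × List (Int × Int) :=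
  let st' :=
    if st.2 ≠ [] ∧ some kv.1 ≠ st.2.getLast?.map Prod.fst then (st.1 ++ [st.2], ([] : List (Int × Int)))
    else st
  (st'.1, st'.2 ++ [kv])

def combine_to_tuple_extract_groups (score_list : List Int) (frame_list : List Int) : List (List (Int × Int)) :=
  let combined := score_list.zip frame_list
  let st := combined.foldl pvStepA ([], [])
  if st.2 ≠ [] then st.1 ++ [st.2] else st.1

-- ===== PORT B =====
-- the list-comprehension guard `i == 0 or combined[i][0] != combined[i-1][0]`;
-- both indexings are within range whenever the guard reaches them (i ∈ range n,
-- and i-1 only read for i ≥ 1), so getD is exact here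
def pvPred (ys : List (Int × Int)) (i : Nat) : Bool :=
  i == 0 || ((ys.getD i (0, 0)).1 != (ys.getD (i - 1) (0, 0)).1)

-- bounds = [i for i in range(n) if …]; bounds.append(n)
def pvBounds (ys : List (Int × Int)) : List Nat :=
  ((List.range ys.length).filter (pvPred ys)) ++ [ys.length]

def combine_to_tuple_extract_groups_alt (score_list : List Int) (frame_list : List Int) : List (List (Int × Int)) :=
  let combined := score_list.zip frame_list
  let bounds := pvBounds combined
  -- [combined[a:b] for a, b in zip(bounds, bounds[1:])]; 0 ≤ a ≤ b ≤ n here, so the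
  -- Python slice combined[a:b] is exactly take (b-a) after drop a
  (bounds.zip bounds.tail).map (fun ab => (combined.drop ab.1).take (ab.2 - ab.1))

-- ===== PRECONDITION & SPEC =====
def Spec_combine_to_tuple_extract_groups (score_list : List Int) (frame_list : List Int) (out : List (List (Int × Int))) : Prop := out = combine_to_tuple_extract_groups_alt score_list frame_list
instance (score_list : List Int) (frame_list : List Int) (out : List (List (Int × Int))) : Decidable (Spec_combine_to_tuple_extract_groups score_list frame_list out) := by unfold Spec_combine_to_tuple_extract_groups; infer_instance

-- ===== CLAIM (what is proved, stated in full; the proofs are below) =====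
def Claim_equal_combine_to_tuple_extract_groups : Prop := ∀ (score_list : List Int) (frame_list : List Int), Dom_combine_to_tuple_extract_groups score_list frame_list → Spec_combine_to_tuple_extract_groups score_list frame_list (combine_to_tuple_extract_groups score_list frame_list)

-- ===== LEMMAS AND PROOFS =====

-- canonical recursive grouping into maximal runs of equal score: both ports equal this
def pvGroupBy : List (Int × Int) → List (List (Int × Int))
  | [] => []
  | p :: rest =>
    (p :: rest.takeWhile (fun x => x.1 == p.1)) :: pvGroupBy (rest.dropWhile (fun x => x.1 == p.1))
termination_by xs => xs.length
decreasing_by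
  simpa [Nat.lt_succ_iff] using List.length_dropWhile_le (fun x => x.1 == p.1) rest

theorem pvFilterZero (n : Nat) : (List.range (n + 1)).filter (fun i => i == 0) = [0] := by
  induction n with
  | zero => decide
  | succ n ih => rw [List.range_succ, List.filter_append, ih]; simp

-- score at any index inside the first run (p plus the elements of t) is p.1
theorem pvScoreRun (p : Int × Int) (t d : List (Int × Int)) (ht : ∀ q ∈ t, q.1 = p.1) :
    ∀ i ≤ t.length, ((p :: (t ++ d)).getD i (0, 0)).1 = p.1 := by
  intro i hi
  cases i with
  | zero => simp
  | succ j =>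
    have hj : j < t.length := by omega
    rw [List.getD_cons_succ, List.getD_eq_getElem?_getD, List.getElem?_append_left hj,
      List.getElem?_eq_getElem hj]
    exact ht _ (List.getElem_mem hj)

-- getD past the first run reads from d
theorem pvGetDShift (p : Int × Int) (t d : List (Int × Int)) (j : Nat) :
    (p :: (t ++ d)).getD (t.length + 1 + j) (0, 0) = d.getD j (0, 0) := by
  have : t.length + 1 + j = (t.length + j) + 1 := by omega
  rw [this, List.getD_cons_succ, List.getD_eq_getElem?_getD, List.getD_eq_getElem?_getD,
    List.getElem?_append_right (by omega), show t.length + j - t.length = j from by omega]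

theorem pvBoundsHead (ys : List (Int × Int)) : ∃ c', pvBounds ys = 0 :: c' := by
  cases ys with
  | nil => exact ⟨[], rfl⟩
  | cons y ys' =>
    unfold pvBounds
    rw [show (y :: ys').length = ys'.length + 1 from rfl, List.range_succ_eq_map,
      List.filter_cons]
    simp only [show pvPred (y :: ys') 0 = true by simp [pvPred]]
    exact ⟨_, rfl⟩

theorem pvBoundsCons (p : Int × Int) (t d : List (Int × Int))
    (ht : ∀ q ∈ t, q.1 = p.1)
    (hd : ∀ a l, d = a :: l → a.1 ≠ p.1) :
    pvBounds (p :: (t ++ d)) = 0 :: (pvBounds d).map (fun x => t.length + 1 + x) := by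
  have hlen : (p :: (t ++ d)).length = (t.length + 1) + d.length := by simp; omega
  unfold pvBounds
  rw [hlen, List.range_add, List.filter_append, List.filter_map]
  have h1 : (List.range (t.length + 1)).filter (pvPred (p :: (t ++ d))) = [0] := by
    rw [List.filter_congr (q := fun i => i == 0), pvFilterZero]
    intro i hi
    rw [List.mem_range] at hi
    cases i with
    | zero => simp [pvPred]
    | succ j =>
      have e1 := pvScoreRun p t d ht (j + 1) (by omega)
      have e2 := pvScoreRun p t d ht j (by omega)
      have hb : (((p :: (t ++ d)).getD (j + 1) (0, 0)).1 !=
          ((p :: (t ++ d)).getD (j + 1 - 1) (0, 0)).1) = false := by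
        rw [show j + 1 - 1 = j from rfl, e1, e2]; simp
      simp only [pvPred]
      rw [hb]
      simp
  have h2 : List.filter (pvPred (p :: (t ++ d)) ∘ fun x => t.length + 1 + x)
        (List.range d.length) = List.filter (pvPred d) (List.range d.length) := by
    apply List.filter_congr
    intro j hj
    rw [List.mem_range] at hj
    simp only [Function.comp]
    cases j with
    | zero =>
      cases d with
      | nil => simp at hj
      | cons a l =>
        have hne : a.1 ≠ p.1 := hd a l rfl
        have hx : (p :: (t ++ a :: l)).getD (t.length + 1 + 0) (0, 0) = a := by
          rw [pvGetDShift]; simp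
        have hx1 : ((p :: (t ++ a :: l)).getD (t.length + 1 + 0 - 1) (0, 0)).1 = p.1 := by
          rw [show t.length + 1 + 0 - 1 = t.length from rfl]
          exact pvScoreRun p t (a :: l) ht t.length le_rfl
        have hb : (((p :: (t ++ a :: l)).getD (t.length + 1 + 0) (0, 0)).1 !=
            ((p :: (t ++ a :: l)).getD (t.length + 1 + 0 - 1) (0, 0)).1) = true := by
          rw [hx, hx1]; simpa using hne
        simp only [pvPred]
        rw [hb]
        simp
    | succ j =>
      have hx1 : (p :: (t ++ d)).getD (t.length + 1 + (j + 1)) (0, 0) = d.getD (j + 1) (0, 0) :=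
        pvGetDShift p t d (j + 1)
      have hx2 : (p :: (t ++ d)).getD (t.length + 1 + (j + 1) - 1) (0, 0) = d.getD j (0, 0) := by
        rw [show t.length + 1 + (j + 1) - 1 = t.length + 1 + j from by omega]
        exact pvGetDShift p t d j
      simp only [pvPred]
      rw [hx1, hx2]
      simp
  rw [h1, h2]
  simp [List.map_append]

theorem pvTakeLenTakeWhile (f : Int × Int → Bool) (l : List (Int × Int)) :
    l.take (l.takeWhile f).length = l.takeWhile f := by
  induction l with
  | nil => simp
  | cons a l ih =>
    by_cases h : f a <;> simp [h, ih]

theorem pvDropLenTakeWhile (f : Int × Int → Bool) (l : List (Int × Int)) :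
    l.drop (l.takeWhile f).length = l.dropWhile f := by
  induction l with
  | nil => simp
  | cons a l ih =>
    by_cases h : f a <;> simp [h, ih]

-- the slices between consecutive bounds are exactly the groups
theorem pvSlices_eq_groupBy (xs : List (Int × Int)) :
    ((pvBounds xs).zip (pvBounds xs).tail).map (fun ab => (xs.drop ab.1).take (ab.2 - ab.1))
      = pvGroupBy xs := by
  induction xs using pvGroupBy.induct with
  | case1 => simp [pvGroupBy, pvBounds]
  | case2 p rest ih =>
    have ht : ∀ q ∈ rest.takeWhile (fun x => x.1 == p.1), q.1 = p.1 := by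
      intro q hq
      have := List.mem_takeWhile_imp hq
      simpa using this
    have hd : ∀ a l, rest.dropWhile (fun x => x.1 == p.1) = a :: l → a.1 ≠ p.1 := by
      intro a l hdl
      have h0 : rest.dropWhile (fun x => x.1 == p.1) ≠ [] := by rw [hdl]; simp
      have := List.head_dropWhile_not (fun x : Int × Int => x.1 == p.1) h0
      have hh : (rest.dropWhile (fun x => x.1 == p.1)).head h0 = a := by
        simp only [hdl, List.head_cons]
      rw [hh] at this
      simpa using this
    have hB : pvBounds (p :: rest)
        = 0 :: (pvBounds (rest.dropWhile (fun x => x.1 == p.1))).map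
            (fun x => (rest.takeWhile (fun x => x.1 == p.1)).length + 1 + x) := by
      conv_lhs => rw [show p :: rest
        = p :: (rest.takeWhile (fun x => x.1 == p.1) ++ rest.dropWhile (fun x => x.1 == p.1)) from by
          rw [List.takeWhile_append_dropWhile]]
      exact pvBoundsCons p _ _ ht hd
    obtain ⟨c', hc⟩ := pvBoundsHead (rest.dropWhile (fun x => x.1 == p.1))
    rw [hB, hc]
    simp only [List.map_cons, List.tail_cons, List.zip_cons_cons, List.map_cons]
    conv_rhs => rw [pvGroupBy]
    congr 1
    · rw [List.drop_zero,
        show (rest.takeWhile (fun x => x.1 == p.1)).length + 1 + 0 - 0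
          = (rest.takeWhile (fun x => x.1 == p.1)).length + 1 from by omega,
        List.take_succ_cons, pvTakeLenTakeWhile]
    · rw [← List.map_cons, List.zip_map,
        show ((0 :: c').zip c')
          = (pvBounds (rest.dropWhile (fun x => x.1 == p.1))).zip
              (pvBounds (rest.dropWhile (fun x => x.1 == p.1))).tail from by rw [hc]; rfl,
        List.map_map]
      rw [← ih]
      apply List.map_congr_left
      intro ab _
      simp only [Function.comp, Prod.map]
      congr 1
      · omega
      · rw [show (rest.takeWhile (fun x => x.1 == p.1)).length + 1 + ab.1
            = ((rest.takeWhile (fun x => x.1 == p.1)).length + ab.1) + 1 from by omega,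
          List.drop_succ_cons, ← List.drop_drop, pvDropLenTakeWhile]

def pvFlush (st : List (List (Int × Int)) × List (Int × Int)) : List (List (Int × Int)) :=
  if st.2 ≠ [] then st.1 ++ [st.2] else st.1

-- A-side loop invariant: with a nonempty current group whose last element has score k,
-- finishing A's loop produces the current run extended by the next k-run, then the groups of the rest
theorem pvLoop_eq (xs : List (Int × Int)) : ∀ (groups : List (List (Int × Int)))
    (cur : List (Int × Int)) (k : Int), cur.getLast?.map Prod.fst = some k →
    pvFlush (xs.foldl pvStepA (groups, cur)) =
      groups ++ (cur ++ xs.takeWhile (fun q => q.1 == k)) :: pvGroupBy (xs.dropWhile (fun q => q.1 == k)) := by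
  induction xs with
  | nil =>
    intro groups cur k hk
    have hcur : cur ≠ [] := by
      intro h; subst h; simp at hk
    simp [pvFlush, pvGroupBy, hcur]
  | cons q xs ih =>
    intro groups cur k hk
    have hcur : cur ≠ [] := by
      intro h; subst h; simp at hk
    by_cases hq : q.1 = k
    · have hstep : pvStepA (groups, cur) q = (groups, cur ++ [q]) := by
        simp [pvStepA, hk, hq]
      have hlast : (cur ++ [q]).getLast?.map Prod.fst = some k := by
        simp [List.getLast?_append, hq]
      simp only [List.foldl_cons, hstep]
      rw [ih groups (cur ++ [q]) k hlast]
      simp [hq]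
    · have hstep : pvStepA (groups, cur) q = (groups ++ [cur], [q]) := by
        simp [pvStepA, hk, hcur, hq]
      have hlast : ([q] : List (Int × Int)).getLast?.map Prod.fst = some q.1 := by simp
      simp only [List.foldl_cons, hstep]
      rw [ih (groups ++ [cur]) [q] q.1 hlast]
      simp [hq, pvGroupBy]

theorem portA_eq_groupBy (score_list frame_list : List Int) :
    combine_to_tuple_extract_groups score_list frame_list = pvGroupBy (score_list.zip frame_list) := by
  unfold combine_to_tuple_extract_groups
  cases h : score_list.zip frame_list with
  | nil => simp [pvGroupBy]
  | cons p rest =>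
    have hstep : pvStepA (([] : List (List (Int × Int))), ([] : List (Int × Int))) p = ([], [p]) := by
      simp [pvStepA]
    have hlast : ([p] : List (Int × Int)).getLast?.map Prod.fst = some p.1 := by simp
    show pvFlush ((p :: rest).foldl pvStepA ([], [])) = pvGroupBy (p :: rest)
    simp only [List.foldl_cons, hstep]
    rw [pvLoop_eq rest [] [p] p.1 hlast]
    simp [pvGroupBy]

-- ===== VERDICT (by name: the statement is the Claim_ definition above) =====
theorem combine_to_tuple_extract_groups_spec : Claim_equal_combine_to_tuple_extract_groups := by
  intro score_list frame_list _
  unfold Spec_combine_to_tuple_extract_groups combine_to_tuple_extract_groups_alt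
  rw [portA_eq_groupBy]
  exact (pvSlices_eq_groupBy _).symm
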